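-- pv_equiv track=rewrite | github.com/alfmunny/Amazon-QA-Preparation | Turnstile/solution.py | solve
-- ===== SOURCE A (Python) =====
-- def solve(numCustomers, arrTime, direction):
--
--   exit = []
--   enter = []
--
--   for i in range(len(arrTime)):
--     if direction[i] == 1:
--       exit.append([arrTime[i], i])
--     else:
--       enter.append([arrTime[i], i])
--
--   state = -1 # previous state: -1:not used,  1: enter, 0: exit
--   timer = 0 #
--   ans = [0] * len(arrTime)
--
--   while exit or enter:
--     if exit and exit[0][0] <= timer and (state == -1 or state == 0 or not enter or enter[0][0] > timer):
--       ans[exit[0][1]] = timer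
--       exit.pop(0)
--       state = 0
--     elif enter and enter[0][0] <= timer:
--       ans[enter[0][1]] = timer
--       enter.pop(0)
--       state = 1
--     else:
--       state = -1
--
--     timer += 1
--
--   return ans
-- ===== SOURCE B (Python) =====
-- def solve(numCustomers, arrTime, direction):
--     # Index pointers over the two priority queues; the timer jumps over idle
--     # gaps straight to the next pending arrival instead of ticking one by one.
--     ex = [(arrTime[i], i) for i in range(len(arrTime)) if direction[i] == 1]
--     en = [(arrTime[i], i) for i in range(len(arrTime)) if direction[i] != 1]
--     ans = [0] * len(arrTime)
--     e = 0
--     g = 0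
--     state = -1
--     timer = 0
--     while e < len(ex) or g < len(en):
--         # next pending arrival time
--         if e < len(ex) and g < len(en):
--             m = min(ex[e][0], en[g][0])
--         elif e < len(ex):
--             m = ex[e][0]
--         else:
--             m = en[g][0]
--         if m > timer:  # idle gap: jump, the turnstile was unused last second
--             timer = m
--             state = -1
--         if e < len(ex) and ex[e][0] <= timer and (state == -1 or state == 0 or g == len(en) or en[g][0] > timer):
--             ans[ex[e][1]] = timer
--             e += 1
--             state = 0
--         else:
--             ans[en[g][1]] = timer
--             g += 1
--             state = 1
--         timer += 1
--     return ans
-- ===== Notes on version B (the rewrite author's own statement) =====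
-- stated objective: faster
-- what changed: B replaces A's list.pop(0) queue consumption and one-second-at-a-time while loop by two index pointers into the fixed queues and a timer that jumps over idle gaps directly to the next pending arrival time, making the cost independent of the clock values.
import Mathlib
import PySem

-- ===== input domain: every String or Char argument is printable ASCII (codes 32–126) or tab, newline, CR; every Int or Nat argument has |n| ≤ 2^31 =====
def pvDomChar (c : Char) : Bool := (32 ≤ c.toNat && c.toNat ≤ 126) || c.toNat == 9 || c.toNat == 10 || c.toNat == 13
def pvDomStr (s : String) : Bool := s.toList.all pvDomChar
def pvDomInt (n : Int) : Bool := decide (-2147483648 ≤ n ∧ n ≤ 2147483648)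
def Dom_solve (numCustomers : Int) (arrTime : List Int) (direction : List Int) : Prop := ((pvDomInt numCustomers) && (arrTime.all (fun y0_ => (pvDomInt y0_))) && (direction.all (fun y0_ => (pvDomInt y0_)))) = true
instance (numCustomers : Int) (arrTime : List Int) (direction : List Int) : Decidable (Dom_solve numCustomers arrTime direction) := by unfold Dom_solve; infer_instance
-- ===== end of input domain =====

-- B replaces A's one-second simulation steps and list.pop(0) by two index pointers and a
-- timer that jumps over idle gaps straight to the next pending arrival (objective: faster).

-- ===== PORT A =====
-- the for-loop building the two queues; getD is exact because every index i of
-- range(len(arrTime)) is in range for arrTime and (under Pre_solve) for direction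
def buildA (arrTime direction : List Int) : List (Int × Nat) × List (Int × Nat) :=
  (List.range arrTime.length).foldl
    (fun acc i =>
      if direction.getD i 0 = 1 then (acc.1 ++ [(arrTime.getD i 0, i)], acc.2)
      else (acc.1, acc.2 ++ [(arrTime.getD i 0, i)]))
    ([], [])

-- second component of A's lexicographic termination measure: distance from the timer
-- to the earliest pending arrival (0 once someone is already waiting)
def gapA (ex en : List (Int × Nat)) (timer : Int) : Nat :=
  match ex, en with
  | [], [] => 0
  | (t, _) :: _, [] => (t - timer).toNat
  | [], (s, _) :: _ => (s - timer).toNat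
  | (t, _) :: _, (s, _) :: _ => (min t s - timer).toNat

-- A's while loop, step for step (headD's default is never read: Python short-circuits)
def loopA (ex en : List (Int × Nat)) (state timer : Int) (ans : List Int) : List Int :=
  match ex, en with
  | [], [] => ans
  | (t, i) :: ex', en =>
    if t ≤ timer ∧ (state = -1 ∨ state = 0 ∨ en = [] ∨ (en.headD (0, 0)).1 > timer) then
      loopA ex' en 0 (timer + 1) (ans.set i timer)
    else
      match hen : en with
      | (s, j) :: en' =>
        if s ≤ timer then loopA ((t, i) :: ex') en' 1 (timer + 1) (ans.set j timer)
        else loopA ((t, i) :: ex') ((s, j) :: en') (-1) (timer + 1) ans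
      | [] => loopA ((t, i) :: ex') [] (-1) (timer + 1) ans
  | [], (s, j) :: en' =>
    if s ≤ timer then loopA [] en' 1 (timer + 1) (ans.set j timer)
    else loopA [] ((s, j) :: en') (-1) (timer + 1) ans
  termination_by (ex.length + en.length, gapA ex en timer)
  decreasing_by
  · exact Prod.Lex.left _ _ (by simp)
  · exact Prod.Lex.left _ _ (by simp)
  · apply Prod.Lex.right
    subst hen; simp only [gapA, List.headD_cons] at *; omega
  · apply Prod.Lex.right
    subst hen; simp_all [gapA]
  · exact Prod.Lex.left _ _ (by simp)
  · apply Prod.Lex.right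
    simp only [gapA] at *; omega

def solve (numCustomers : Int) (arrTime : List Int) (direction : List Int) : List Int :=
  let q := buildA arrTime direction
  loopA q.1 q.2 (-1) 0 (List.replicate arrTime.length 0)

-- ===== PORT B =====
-- the two comprehensions of Source B (getD exact: indices drawn from range(len(arrTime)))
def buildB (arrTime direction : List Int) : List (Int × Nat) × List (Int × Nat) :=
  (((List.range arrTime.length).filter (fun i => direction.getD i 0 == 1)).map
      (fun i => (arrTime.getD i 0, i)),
   ((List.range arrTime.length).filter (fun i => !(direction.getD i 0 == 1))).map
      (fun i => (arrTime.getD i 0, i)))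

-- Source B's while loop with index pointers e, g and the gap-jumping timer; the final
-- 'else ans' is a totality guard only — Python's else branch always has g < len(en)
def loopB (ex en : List (Int × Nat)) (e g : Nat) (state timer : Int) (ans : List Int) : List Int :=
  if e < ex.length ∨ g < en.length then
    let m : Int :=
      if e < ex.length ∧ g < en.length then min (ex.getD e (0, 0)).1 (en.getD g (0, 0)).1
      else if e < ex.length then (ex.getD e (0, 0)).1
      else (en.getD g (0, 0)).1
    let timer' := if m > timer then m else timer
    let state' := if m > timer then (-1 : Int) else state
    if he : e < ex.length ∧ (ex.getD e (0, 0)).1 ≤ timer' ∧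
        (state' = -1 ∨ state' = 0 ∨ g = en.length ∨ (en.getD g (0, 0)).1 > timer') then
      loopB ex en (e + 1) g 0 (timer' + 1) (ans.set (ex.getD e (0, 0)).2 timer')
    else if hg : g < en.length then
      loopB ex en e (g + 1) 1 (timer' + 1) (ans.set (en.getD g (0, 0)).2 timer')
    else ans
  else ans
  termination_by (ex.length - e) + (en.length - g)
  decreasing_by
  · omega
  · omega

def solve_alt (numCustomers : Int) (arrTime : List Int) (direction : List Int) : List Int :=
  let q := buildB arrTime direction
  loopB q.1 q.2 0 0 (-1) 0 (List.replicate arrTime.length 0)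

-- ===== PRECONDITION & SPEC =====
-- Pre_solve: direction must cover every index of arrTime; otherwise both Pythons raise IndexError
def Pre_solve (numCustomers : Int) (arrTime : List Int) (direction : List Int) : Prop :=
  arrTime.length ≤ direction.length
instance (numCustomers : Int) (arrTime : List Int) (direction : List Int) : Decidable (Pre_solve numCustomers arrTime direction) := by unfold Pre_solve; infer_instance
def pvWitness_solve : Int × List Int × List Int := (4, [0, 1, 1, 3], [0, 1, 1, 0])

def Spec_solve (numCustomers : Int) (arrTime : List Int) (direction : List Int) (out : List Int) : Prop := out = solve_alt numCustomers arrTime direction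
instance (numCustomers : Int) (arrTime : List Int) (direction : List Int) (out : List Int) : Decidable (Spec_solve numCustomers arrTime direction out) := by unfold Spec_solve; infer_instance

-- ===== CLAIM (what is proved, stated in full; the proofs are below) =====
def Claim_equal_solve : Prop := ∀ (numCustomers : Int) (arrTime : List Int) (direction : List Int), Dom_solve numCustomers arrTime direction → Pre_solve numCustomers arrTime direction → Spec_solve numCustomers arrTime direction (solve numCustomers arrTime direction)

-- ===== LEMMAS AND PROOFS =====

lemma build_foldl (arrTime direction : List Int) (l : List Nat) (p q : List (Int × Nat)) :
    l.foldl (fun acc i =>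
        if direction.getD i 0 = 1 then (acc.1 ++ [(arrTime.getD i 0, i)], acc.2)
        else (acc.1, acc.2 ++ [(arrTime.getD i 0, i)])) (p, q)
      = (p ++ (l.filter (fun i => direction.getD i 0 == 1)).map (fun i => (arrTime.getD i 0, i)),
         q ++ (l.filter (fun i => !(direction.getD i 0 == 1))).map (fun i => (arrTime.getD i 0, i))) := by
  induction l generalizing p q with
  | nil => simp
  | cons a l ih =>
    rw [List.foldl_cons, List.filter_cons, List.filter_cons]
    by_cases h : direction.getD a 0 = 1
    · have h' : direction[a]?.getD 0 = 1 := h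
      rw [if_pos h, ih]
      simp [h']
    · have h' : ¬ direction[a]?.getD 0 = 1 := h
      rw [if_neg h, ih]
      simp [h']

lemma build_eq (arrTime direction : List Int) : buildA arrTime direction = buildB arrTime direction := by
  unfold buildA buildB
  rw [build_foldl]
  simp

lemma loopA_nil (state timer : Int) (ans : List Int) : loopA [] [] state timer ans = ans := by
  rw [loopA.eq_def]

lemma loopA_idle (ex en : List (Int × Nat)) (state timer : Int) (ans : List Int)
    (hne : ex ≠ [] ∨ en ≠ [])
    (hx : ∀ p ∈ ex.head?, timer < p.1) (hn : ∀ p ∈ en.head?, timer < p.1) :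
    loopA ex en state timer ans = loopA ex en (-1) (timer + 1) ans := by
  cases ex with
  | nil =>
    cases en with
    | nil => simp at hne
    | cons b en' =>
      obtain ⟨s, j⟩ := b
      have hs : timer < s := hn (s, j) (by simp)
      rw [loopA.eq_def]
      simp [not_le.mpr hs]
  | cons a ex' =>
    obtain ⟨t, i⟩ := a
    have ht : timer < t := hx (t, i) (by simp)
    cases en with
    | nil =>
      rw [loopA.eq_def]
      simp [not_le.mpr ht]
    | cons b en' =>
      obtain ⟨s, j⟩ := b
      have hs : timer < s := hn (s, j) (by simp)
      rw [loopA.eq_def]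
      simp [not_le.mpr ht, not_le.mpr hs]

lemma loopA_skip (k : Nat) : ∀ (ex en : List (Int × Nat)) (state timer m : Int) (ans : List Int),
    (ex ≠ [] ∨ en ≠ []) → (∀ p ∈ ex.head?, m ≤ p.1) → (∀ p ∈ en.head?, m ≤ p.1) →
    timer + (k + 1 : Nat) = m →
    loopA ex en state timer ans = loopA ex en (-1) m ans := by
  induction k with
  | zero =>
    intro ex en state timer m ans hne hx hn hk
    have hm : m = timer + 1 := by omega
    subst hm
    exact loopA_idle ex en state timer ans hne
      (fun p hp => by have := hx p hp; omega) (fun p hp => by have := hn p hp; omega)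
  | succ k ih =>
    intro ex en state timer m ans hne hx hn hk
    rw [loopA_idle ex en state timer ans hne
      (fun p hp => by have := hx p hp; omega) (fun p hp => by have := hn p hp; omega)]
    exact ih ex en (-1) (timer + 1) m ans hne hx hn (by omega)

lemma loopB_step (ex en : List (Int × Nat)) (e g : Nat) (state timer : Int) (ans : List Int)
    (hne : e < ex.length ∨ g < en.length) (M T S : Int)
    (hM : M = (if e < ex.length ∧ g < en.length then min (ex.getD e (0, 0)).1 (en.getD g (0, 0)).1
               else if e < ex.length then (ex.getD e (0, 0)).1 else (en.getD g (0, 0)).1))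
    (hT : T = if M > timer then M else timer)
    (hS : S = if M > timer then -1 else state) :
    loopB ex en e g state timer ans =
      if e < ex.length ∧ (ex.getD e (0, 0)).1 ≤ T ∧
          (S = -1 ∨ S = 0 ∨ g = en.length ∨ (en.getD g (0, 0)).1 > T)
      then loopB ex en (e + 1) g 0 (T + 1) (ans.set (ex.getD e (0, 0)).2 T)
      else if g < en.length then loopB ex en e (g + 1) 1 (T + 1) (ans.set (en.getD g (0, 0)).2 T)
      else ans := by
  subst hM hT hS
  rw [loopB]
  rw [if_pos hne]
  rfl

lemma drop_head_disj (en : List (Int × Nat)) (g : Nat) (T : Int) (hg : g ≤ en.length) :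
    (en.drop g = [] ∨ ((en.drop g).headD (0, 0)).1 > T) ↔
      (g = en.length ∨ (en.getD g (0, 0)).1 > T) := by
  rcases Nat.lt_or_ge g en.length with h | h
  · rw [List.drop_eq_getElem_cons h, ← List.getD_eq_getElem en (0, 0) h]
    simp [Nat.ne_of_lt h]
  · have hge : g = en.length := by omega
    subst hge
    simp

lemma serve_eq (n : Nat)
    (ih : ∀ (ex en : List (Int × Nat)) (e g : Nat) (state timer : Int) (ans : List Int),
      e ≤ ex.length → g ≤ en.length → (ex.length - e) + (en.length - g) = n →
      loopA (ex.drop e) (en.drop g) state timer ans = loopB ex en e g state timer ans)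
    (ex en : List (Int × Nat)) (e g : Nat) (state timer : Int) (ans : List Int)
    (he : e ≤ ex.length) (hg : g ≤ en.length)
    (hn : (ex.length - e) + (en.length - g) = n + 1)
    (hM : (e < ex.length ∧ (ex.getD e (0, 0)).1 ≤ timer) ∨
          (g < en.length ∧ (en.getD g (0, 0)).1 ≤ timer)) :
    loopA (ex.drop e) (en.drop g) state timer ans =
      if e < ex.length ∧ (ex.getD e (0, 0)).1 ≤ timer ∧
          (state = -1 ∨ state = 0 ∨ g = en.length ∨ (en.getD g (0, 0)).1 > timer)
      then loopB ex en (e + 1) g 0 (timer + 1) (ans.set (ex.getD e (0, 0)).2 timer)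
      else if g < en.length then loopB ex en e (g + 1) 1 (timer + 1) (ans.set (en.getD g (0, 0)).2 timer)
      else ans := by
  by_cases hcond : e < ex.length ∧ (ex.getD e (0, 0)).1 ≤ timer ∧
      (state = -1 ∨ state = 0 ∨ g = en.length ∨ (en.getD g (0, 0)).1 > timer)
  · rw [if_pos hcond]
    obtain ⟨he', hle, hdisj⟩ := hcond
    rcases hxe : ex.getD e (0, 0) with ⟨t, i⟩
    have hdx : ex.drop e = (t, i) :: ex.drop (e + 1) := by
      rw [List.drop_eq_getElem_cons he', ← List.getD_eq_getElem ex (0, 0) he', hxe]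
    rw [hdx, loopA.eq_def]
    have hdisj' : state = -1 ∨ state = 0 ∨ en.drop g = [] ∨ ((en.drop g).headD (0, 0)).1 > timer := by
      rcases hdisj with h | h | h
      · exact Or.inl h
      · exact Or.inr (Or.inl h)
      · exact Or.inr (Or.inr ((drop_head_disj en g timer hg).mpr h))
    rw [hxe] at hle
    simp only [if_pos (And.intro hle hdisj')]
    exact ih ex en (e + 1) g 0 (timer + 1) _ (by omega) hg (by omega)
  · rw [if_neg hcond]
    have hgl : g < en.length ∧ (en.getD g (0, 0)).1 ≤ timer := by
      by_cases he' : e < ex.length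
      · rcases hM with ⟨_, hte⟩ | h
        · push_neg at hcond
          rcases hcond he' hte with ⟨h1, h2, h3, h4⟩
          exact ⟨by omega, h4⟩
        · exact h
      · rcases hM with ⟨h, _⟩ | h
        · exact absurd h he'
        · exact h
    rw [if_pos hgl.1]
    rcases hxg : en.getD g (0, 0) with ⟨s, j⟩
    have hdrop : en.drop g = (s, j) :: en.drop (g + 1) := by
      rw [List.drop_eq_getElem_cons hgl.1, ← List.getD_eq_getElem en (0, 0) hgl.1, hxg]
    have hsle : s ≤ timer := by have := hgl.2; rw [hxg] at this; exact this
    by_cases he' : e < ex.length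
    · rcases hxe : ex.getD e (0, 0) with ⟨t, i⟩
      have hdx : ex.drop e = (t, i) :: ex.drop (e + 1) := by
        rw [List.drop_eq_getElem_cons he', ← List.getD_eq_getElem ex (0, 0) he', hxe]
      rw [hdx, hdrop, loopA.eq_def]
      have hAcond : ¬ (t ≤ timer ∧ (state = -1 ∨ state = 0 ∨
          ((s, j) :: en.drop (g + 1) : List (Int × Nat)) = [] ∨ s > timer)) := by
        rintro ⟨h1, h2⟩
        apply hcond
        refine ⟨he', by rw [hxe]; exact h1, ?_⟩
        rcases h2 with h2 | h2 | h2 | h2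
        · exact Or.inl h2
        · exact Or.inr (Or.inl h2)
        · simp at h2
        · exact Or.inr (Or.inr (Or.inr (by rw [hxg]; exact h2)))
      simp only [List.headD_cons, if_pos hsle, if_neg hAcond]
      rw [← hdx]
      exact ih ex en e (g + 1) 1 (timer + 1) _ he (by omega) (by omega)
    · have hee : ex.drop e = [] := List.drop_eq_nil_of_le (by omega)
      rw [hee, hdrop, loopA.eq_def]
      simp only [if_pos hsle]
      rw [← hee]
      exact ih ex en e (g + 1) 1 (timer + 1) _ he (by omega) (by omega)

lemma loop_eq (n : Nat) : ∀ (ex en : List (Int × Nat)) (e g : Nat) (state timer : Int) (ans : List Int),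
    e ≤ ex.length → g ≤ en.length → (ex.length - e) + (en.length - g) = n →
    loopA (ex.drop e) (en.drop g) state timer ans = loopB ex en e g state timer ans := by
  induction n with
  | zero =>
    intro ex en e g state timer ans he hg hn
    rw [List.drop_eq_nil_of_le (by omega), List.drop_eq_nil_of_le (by omega), loopA_nil, loopB]
    rw [if_neg (by omega)]
  | succ n ih =>
    intro ex en e g state timer ans he hg hn
    have hne : e < ex.length ∨ g < en.length := by omega
    set M : Int := (if e < ex.length ∧ g < en.length
        then min (ex.getD e (0, 0)).1 (en.getD g (0, 0)).1
        else if e < ex.length then (ex.getD e (0, 0)).1 else (en.getD g (0, 0)).1) with hMdef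
    by_cases hj : M > timer
    · have hne' : ex.drop e ≠ [] ∨ en.drop g ≠ [] := by
        rcases hne with h | h
        · left
          intro hnil
          have hlen := congrArg List.length hnil
          simp at hlen
          omega
        · right
          intro hnil
          have hlen := congrArg List.length hnil
          simp at hlen
          omega
      have hhx : ∀ p ∈ (ex.drop e).head?, M ≤ p.1 := by
        intro p hp
        rw [List.head?_drop] at hp
        obtain ⟨hlt, hpe⟩ := List.getElem?_eq_some_iff.mp hp
        have hgd1 : (ex.getD e (0, 0)).1 = p.1 := by rw [List.getD_eq_getElem ex (0, 0) hlt, hpe]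
        rw [hMdef]
        split_ifs with h1 h2 <;> omega
      have hhn : ∀ p ∈ (en.drop g).head?, M ≤ p.1 := by
        intro p hp
        rw [List.head?_drop] at hp
        obtain ⟨hlt, hpe⟩ := List.getElem?_eq_some_iff.mp hp
        have hgd1 : (en.getD g (0, 0)).1 = p.1 := by rw [List.getD_eq_getElem en (0, 0) hlt, hpe]
        rw [hMdef]
        split_ifs with h1 h2 <;> omega
      rw [loopA_skip (M - timer - 1).toNat (ex.drop e) (en.drop g) state timer M ans hne' hhx hhn
        (by omega)]
      rw [loopB_step ex en e g state timer ans hne M M (-1) hMdef (if_pos hj).symm (if_pos hj).symm]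
      apply serve_eq n ih ex en e g (-1) M ans he hg hn
      rw [hMdef]
      split_ifs with h1 h2 <;> omega
    · rw [loopB_step ex en e g state timer ans hne M timer state hMdef (if_neg hj).symm
        (if_neg hj).symm]
      apply serve_eq n ih ex en e g state timer ans he hg hn
      have hM' := not_lt.mp hj
      rw [hMdef] at hM'
      split_ifs at hM' with h1 h2 <;> omega

-- ===== VERDICT (by name: the statement is the Claim_ definition above) =====
theorem solve_spec : Claim_equal_solve := by
  intro nc arr dir _ _
  unfold Spec_solve solve solve_alt
  rw [build_eq]
  exact loop_eq _ _ _ 0 0 (-1) 0 _ (by omega) (by omega) rfl
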